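-- pv_equiv track=rewrite | github.com/XFY9326/EPOSRunner | epos_runner/paraller_executor.py | _generate_properties
-- ===== SOURCE A (Python) =====
-- from copy import deepcopy
-- from itertools import product
-- from typing import Dict, List, Tuple, Any, Optional
--
-- def _generate_properties(template: Dict[str, Any], params: Dict[str, List[Any]]) -> Tuple[List[Dict[str, Any]], List[Dict[str, Any]]]:
--     items_list = []
--     for key, value in params.items():
--         if not isinstance(value, list) and not isinstance(value, tuple) and not isinstance(value, set):
--             raise ValueError("Params value must be list, tuple or set!")
--         items_list.append([(key, v) for v in value])
--     new_properties_list = []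
--     modified_properties_list = []
--     for items in product(*items_list):
--         new_properties = deepcopy(template)
--         modified_properties = {}
--         for key, value in items:
--             new_properties[key] = value
--             modified_properties[key] = value
--         new_properties_list.append(new_properties)
--         modified_properties_list.append(modified_properties)
--     return new_properties_list, modified_properties_list
-- ===== SOURCE B (Python) =====
-- from copy import deepcopy
--
--
-- def _generate_properties(template, params):
--     # validate every params value up front
--     for value in params.values():
--         if not isinstance(value, (list, tuple, set)):
--             raise ValueError("Params value must be list, tuple or set!")
--     # grow the combinations iteratively: last param varies fastest
--     frontier = [(deepcopy(template), {})]
--     for key, values in params.items():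
--         frontier = [({**new_p, key: v}, {**mod_p, key: v})
--                     for new_p, mod_p in frontier
--                     for v in values]
--     return [np for np, _ in frontier], [mp for _, mp in frontier]
-- ===== Notes on version B (the rewrite author's own statement) =====
-- stated objective: alternative
-- what changed: Replaces itertools.product over per-key (key,value) pair lists plus a per-combination deepcopy-and-overlay loop with an iterative frontier of (new,modified) dict pairs that is extended key by key, so no combination tuples are ever materialised.
import Mathlib
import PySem

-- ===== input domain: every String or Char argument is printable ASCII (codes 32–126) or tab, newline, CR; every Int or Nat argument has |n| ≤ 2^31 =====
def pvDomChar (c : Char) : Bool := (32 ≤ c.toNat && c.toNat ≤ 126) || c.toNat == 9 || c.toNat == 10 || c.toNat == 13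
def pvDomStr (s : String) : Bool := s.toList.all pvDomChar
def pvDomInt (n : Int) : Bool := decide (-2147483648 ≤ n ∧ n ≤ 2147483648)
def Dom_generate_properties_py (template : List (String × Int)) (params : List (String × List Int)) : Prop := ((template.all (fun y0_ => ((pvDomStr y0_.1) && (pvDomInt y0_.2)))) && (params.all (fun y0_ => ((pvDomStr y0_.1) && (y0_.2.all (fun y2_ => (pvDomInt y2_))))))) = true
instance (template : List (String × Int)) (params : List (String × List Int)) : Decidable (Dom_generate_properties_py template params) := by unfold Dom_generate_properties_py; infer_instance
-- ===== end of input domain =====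

-- B replaces itertools.product + per-combination deepcopy/overlay by an iterative frontier of
-- (new, modified) dict pairs extended key by key (alternative decomposition; return value proved equal).

-- ===== PORT A =====
-- itertools.product(*ls): rightmost list varies fastest
def pvProduct (ls : List (List (String × Int))) : List (List (String × Int)) :=
  ls.foldr (fun xs acc => xs.flatMap (fun x => acc.map (x :: ·))) [[]]

def generate_properties_py (template : List (String × Int)) (params : List (String × List Int)) : (List (List (String × Int))) × (List (List (String × Int))) :=
  -- items_list = [[(key, v) for v in value] for key, value in params.items()]
  -- (the isinstance validation always passes: every value is a list under the type convention)
  let items_list := params.map (fun kv => kv.2.map (fun v => (kv.1, v)))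
  -- for items in product(*items_list): build new_properties / modified_properties and append
  (pvProduct items_list).foldl
    (fun acc items =>
      let new_properties :=
        items.foldl (fun d kv => d.insert kv.1 kv.2) (PySem.Dict.mk template)
      let modified_properties :=
        items.foldl (fun d kv => d.insert kv.1 kv.2) (PySem.Dict.empty : PySem.Dict String Int)
      (acc.1 ++ [new_properties.items], acc.2 ++ [modified_properties.items]))
    ([], [])

-- ===== PORT B =====
-- one frontier step: extend every (new, modified) pair by every value of the current key
def pvStep (fr : List (PySem.Dict String Int × PySem.Dict String Int)) (kv : String × List Int) : List (PySem.Dict String Int × PySem.Dict String Int) :=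
  fr.flatMap (fun p => kv.2.map (fun v => (p.1.insert kv.1 v, p.2.insert kv.1 v)))

def generate_properties_py_alt (template : List (String × Int)) (params : List (String × List Int)) : (List (List (String × Int))) × (List (List (String × Int))) :=
  let frontier := params.foldl pvStep [(PySem.Dict.mk template, PySem.Dict.empty)]
  (frontier.map (fun p => p.1.items), frontier.map (fun p => p.2.items))

-- ===== PRECONDITION & SPEC =====
def Spec_generate_properties_py (template : List (String × Int)) (params : List (String × List Int)) (out : (List (List (String × Int))) × (List (List (String × Int)))) : Prop := out = generate_properties_py_alt template params
instance (template : List (String × Int)) (params : List (String × List Int)) (out : (List (List (String × Int))) × (List (List (String × Int)))) : Decidable (Spec_generate_properties_py template params out) := by unfold Spec_generate_properties_py; infer_instance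

-- ===== CLAIM (what is proved, stated in full; the proofs are below) =====
def Claim_equal_generate_properties_py : Prop := ∀ (template : List (String × Int)) (params : List (String × List Int)), Dom_generate_properties_py template params → Spec_generate_properties_py template params (generate_properties_py template params)

-- ===== LEMMAS AND PROOFS =====

theorem pvStepFold_nil (ps : List (String × List Int)) :
    ps.foldl pvStep [] = [] := by
  induction ps with
  | nil => rfl
  | cons kv rest ih => simpa [pvStep] using ih

theorem pvStepFold_append (ps : List (String × List Int))
    (l₁ l₂ : List (PySem.Dict String Int × PySem.Dict String Int)) :
    ps.foldl pvStep (l₁ ++ l₂) = ps.foldl pvStep l₁ ++ ps.foldl pvStep l₂ := by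
  induction ps generalizing l₁ l₂ with
  | nil => rfl
  | cons kv rest ih =>
    simp only [List.foldl_cons]
    rw [show pvStep (l₁ ++ l₂) kv = pvStep l₁ kv ++ pvStep l₂ kv by
          simp [pvStep]]
    exact ih _ _

theorem pvStepFold_map (ps : List (String × List Int)) (vs : List Int)
    (g : Int → PySem.Dict String Int × PySem.Dict String Int) :
    ps.foldl pvStep (vs.map g) = vs.flatMap (fun v => ps.foldl pvStep [g v]) := by
  induction vs with
  | nil => simpa using pvStepFold_nil ps
  | cons v vs ih =>
    have : (v :: vs).map g = [g v] ++ vs.map g := by simp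
    rw [this, pvStepFold_append, ih]
    simp

-- split A's two-list accumulator fold into two maps (specialisation of PySem.List.foldl_prod_mk)
theorem pvSplit {A B C : Type} (F : A → B) (G : A → C) (l : List A) :
    l.foldl (fun acc items => (acc.1 ++ [F items], acc.2 ++ [G items])) ([], [])
      = (l.map F, l.map G) := by
  have h := PySem.List.foldl_prod_mk (fun s e => s ++ [F e]) (fun s e => s ++ [G e]) l
    ([] : List B) ([] : List C)
  simpa [PySem.List.foldl_append_singleton_eq_map, ← List.flatMap_def, ← List.map_eq_flatMap] using h

-- the heart: mapping "fold the combination into both dicts" over the product equals the frontier fold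
theorem pvMain (ps : List (String × List Int)) (np mp : PySem.Dict String Int) :
    (pvProduct (ps.map (fun kv => kv.2.map (fun v => (kv.1, v))))).map
      (fun c => (c.foldl (fun d kv => d.insert kv.1 kv.2) np,
                 c.foldl (fun d kv => d.insert kv.1 kv.2) mp))
    = ps.foldl pvStep [(np, mp)] := by
  induction ps generalizing np mp with
  | nil => rfl
  | cons kv rest ih =>
    simp only [List.map_cons, pvProduct, List.foldr_cons, List.foldl_cons]
    rw [show pvStep [(np, mp)] kv
          = kv.2.map (fun v => (np.insert kv.1 v, mp.insert kv.1 v)) by simp [pvStep]]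
    rw [pvStepFold_map]
    simp only [List.map_flatMap, List.flatMap_map, List.map_map]
    refine List.flatMap_congr ?_
    intro v _
    simpa [pvProduct, Function.comp] using ih (np.insert kv.1 v) (mp.insert kv.1 v)

-- ===== VERDICT (by name: the statement is the Claim_ definition above) =====
theorem generate_properties_py_spec : Claim_equal_generate_properties_py := by
  intro template params _
  show _ = _
  simp only [generate_properties_py, generate_properties_py_alt]
  rw [pvSplit]
  rw [← pvMain params (PySem.Dict.mk template) PySem.Dict.empty]
  simp [Function.comp]
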